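-- pv_equiv track=rewrite | github.com/GauthamAjayKannan/coding | TIC-TAC-TOE.py | change_value
-- ===== SOURCE A (Python) =====
-- def check_status(board,symbol):
--     cb=[]
--     for i in board:
--       temp=[]
--       for j in i:
--           cb.append(list(j.values())[0])
--
--     # row_check
--     if ((cb[0]==symbol and cb[1]==symbol and cb[2]==symbol) or
--        (cb[3]==symbol and cb[4]==symbol and cb[5]==symbol) or
--        (cb[6]==symbol and cb[7]==symbol and cb[8]==symbol)):
--        return True
--
--     #column_check
--     elif ((cb[0]==symbol and cb[3]==symbol and cb[6]==symbol)or
--        (cb[1]==symbol and cb[4]==symbol and cb[7]==symbol) or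
--        (cb[2]==symbol and cb[5]==symbol and cb[8]==symbol)):
--        return True
--
--     #diagonal check
--     elif ((cb[0]==symbol and cb[4]==symbol and cb[8]==symbol) or (cb[2]==symbol and cb[4]==symbol and cb[6]==symbol)):
--         return True
--
--     else:
--         return False
--
-- def change_value(turn,board,pos,symbol):
--     if pos in range(1,4):
--         row_index=0
--     elif pos in range(4,7):
--         row_index=1
--     else:
--         row_index=2
--     for i in range(0,len(board[row_index])):
--         if list(board[row_index][i].keys())[0]==pos:
--             board[row_index][i][pos]=symbol
--             break
--
--
--     status=check_status(board,symbol)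
--
--     return status
-- ===== SOURCE B (Python) =====
-- # Alternative algorithm: Lo Shu magic-square win test (three occupied cells win
-- # iff their magic values sum to 15) instead of eight hardcoded line checks.
-- # Performs the same in-place board mutation as A; equivalence is about the return value.
-- MAGIC = [8, 1, 6, 3, 5, 7, 4, 9, 2]
--
-- def _pair(vals, t):
--     if not vals:
--         return False
--     return (t - vals[0]) in vals[1:] or _pair(vals[1:], t)
--
-- def _triple(vals):
--     if not vals:
--         return False
--     return _pair(vals[1:], 15 - vals[0]) or _triple(vals[1:])
--
-- def change_value(turn, board, pos, symbol):
--     row_index = (pos - 1) // 3 if 1 <= pos <= 6 else 2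
--     row = board[row_index]
--     idx = next((i for i, c in enumerate(row) if next(iter(c)) == pos), None)
--     if idx is not None:
--         row[idx][pos] = symbol
--     cells = [next(iter(c.values())) for r in board for c in r]
--     mine = [m for v, m in zip(cells, MAGIC) if v == symbol]
--     return _triple(mine)
-- ===== Notes on version B (the rewrite author's own statement) =====
-- stated objective: alternative
-- what changed: Replaces the eight hardcoded line checks with the Lo Shu magic-square criterion - collect the magic values of the cells holding the symbol and recursively test whether any three of them sum to 15 - and computes the row index arithmetically and the cell update via a single find instead of an index loop with break.
-- outside the precondition, e.g. on change_value(1, [[{1: 'X'}, {2: 'X'}, {3: 'X'}]], 1, 'X'): A returns True, B returns True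
import Mathlib
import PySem

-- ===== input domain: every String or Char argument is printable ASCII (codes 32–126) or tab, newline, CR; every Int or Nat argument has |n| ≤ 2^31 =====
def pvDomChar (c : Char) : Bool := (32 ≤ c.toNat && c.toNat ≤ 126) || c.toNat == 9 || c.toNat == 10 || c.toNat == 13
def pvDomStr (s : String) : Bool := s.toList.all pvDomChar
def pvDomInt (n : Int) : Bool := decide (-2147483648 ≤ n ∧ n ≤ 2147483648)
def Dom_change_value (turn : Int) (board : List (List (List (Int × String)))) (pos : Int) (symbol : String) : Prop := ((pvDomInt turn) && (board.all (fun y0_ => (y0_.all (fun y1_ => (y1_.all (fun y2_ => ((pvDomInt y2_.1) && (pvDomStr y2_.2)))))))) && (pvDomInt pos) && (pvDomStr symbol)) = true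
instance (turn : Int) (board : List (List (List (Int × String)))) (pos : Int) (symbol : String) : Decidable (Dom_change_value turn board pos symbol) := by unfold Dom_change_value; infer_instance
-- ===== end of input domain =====

-- B replaces the eight hardcoded line checks by the Lo Shu magic-square criterion (any three
-- occupied cells' magic values summing to 15); equivalence is about the RETURN value (A also
-- mutates `board` in place; B performs the same mutation, see Source B).

-- ===== PORT A =====
-- A's write loop 'for i in range(0, len(board[row_index])): … break', as index recursion.
def pvWriteLoop (row : List (List (Int × String))) (pos : Int) (symbol : String) (i : Nat) : List (List (Int × String)) :=
  if h : i < row.length then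
    if ((PySem.Dict.ofList row[i]).keys).headD 0 == pos then
      -- board[row_index][i][pos] = symbol, then break
      row.set i ((PySem.Dict.ofList row[i]).insert pos symbol).items
    else pvWriteLoop row pos symbol (i + 1)
  else row
termination_by row.length - i

def check_status (board : List (List (List (Int × String)))) (symbol : String) : Bool :=
  -- cb built by the nested append loop; list(j.values())[0] is values.headD "" (dicts are
  -- nonempty under Pre_, so the default is never read on admitted inputs)
  let cb := board.foldl (fun cb i => i.foldl (fun cb j => cb ++ [((PySem.Dict.ofList j).values).headD ""]) cb) []
  -- cb[n]: in range under Pre_ (at least 9 cells)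
  let g := fun (n : Nat) => cb.getD n ""
  if (g 0 == symbol && g 1 == symbol && g 2 == symbol) ||
     (g 3 == symbol && g 4 == symbol && g 5 == symbol) ||
     (g 6 == symbol && g 7 == symbol && g 8 == symbol) then true
  else if (g 0 == symbol && g 3 == symbol && g 6 == symbol) ||
          (g 1 == symbol && g 4 == symbol && g 7 == symbol) ||
          (g 2 == symbol && g 5 == symbol && g 8 == symbol) then true
  else if (g 0 == symbol && g 4 == symbol && g 8 == symbol) ||
          (g 2 == symbol && g 4 == symbol && g 6 == symbol) then true
  else false

def change_value (turn : Int) (board : List (List (List (Int × String)))) (pos : Int) (symbol : String) : Bool :=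
  let row_index : Nat := if 1 ≤ pos ∧ pos < 4 then 0 else if 4 ≤ pos ∧ pos < 7 then 1 else 2
  -- board[row_index]: in range under Pre_
  let board' := board.set row_index (pvWriteLoop (board.getD row_index []) pos symbol 0)
  check_status board' symbol

-- ===== PORT B =====
def MAGIC : List Int := [8, 1, 6, 3, 5, 7, 4, 9, 2]

-- _pair(vals, t): some later element equals t - vals[0], or recurse on the tail
def pvPairB : List Int → Int → Bool
  | [], _ => false
  | x :: rest, t => rest.contains (t - x) || pvPairB rest t

-- _triple(vals): some pair of later elements sums with vals[0] to 15, or recurse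
def pvTripleB : List Int → Bool
  | [] => false
  | x :: rest => pvPairB rest (15 - x) || pvTripleB rest

def change_value_alt (turn : Int) (board : List (List (List (Int × String)))) (pos : Int) (symbol : String) : Bool :=
  let row_index : Nat := if 1 ≤ pos ∧ pos ≤ 6 then (PySem.Int.floordiv (pos - 1) 3).toNat else 2
  let row := board.getD row_index []
  -- idx = next((i for i, c in enumerate(row) if next(iter(c)) == pos), None); mutate if found
  let row' := match row.findIdx? (fun c => ((PySem.Dict.ofList c).keys).headD 0 == pos) with
    | some i => row.set i (((PySem.Dict.ofList (row.getD i [])).insert pos symbol).items)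
    | none => row
  let board' := board.set row_index row'
  let cells := board'.flatMap (fun r => r.map (fun c => ((PySem.Dict.ofList c).values).headD ""))
  let mine := ((cells.zip MAGIC).filter (fun p => p.1 == symbol)).map Prod.snd
  pvTripleB mine

-- ===== PRECONDITION & SPEC =====
-- Pre_ excludes the inputs on which A raises IndexError: a missing indexed row, an empty
-- cell-dict, or a board with fewer than 9 cells (on rare short boards whose first cells
-- already win, A still returns True — B matches there; see the cite).
def Pre_change_value (turn : Int) (board : List (List (List (Int × String)))) (pos : Int) (symbol : String) : Prop :=
  (if 1 ≤ pos ∧ pos ≤ 3 then (0 : Nat) else if 4 ≤ pos ∧ pos ≤ 6 then 1 else 2) < board.length ∧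
  (∀ row ∈ board, ∀ cell ∈ row, cell ≠ []) ∧
  9 ≤ (board.map List.length).sum
instance (turn : Int) (board : List (List (List (Int × String)))) (pos : Int) (symbol : String) : Decidable (Pre_change_value turn board pos symbol) := by unfold Pre_change_value; infer_instance

def pvWitness_change_value : Int × (List (List (List (Int × String)))) × Int × String :=
  (1, [[[(1, " ")], [(2, " ")], [(3, " ")]],
       [[(4, " ")], [(5, " ")], [(6, " ")]],
       [[(7, " ")], [(8, " ")], [(9, " ")]]], 5, "X")

def Spec_change_value (turn : Int) (board : List (List (List (Int × String)))) (pos : Int) (symbol : String) (out : Bool) : Prop := out = change_value_alt turn board pos symbol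
instance (turn : Int) (board : List (List (List (Int × String)))) (pos : Int) (symbol : String) (out : Bool) : Decidable (Spec_change_value turn board pos symbol out) := by unfold Spec_change_value; infer_instance

-- ===== CLAIM (what is proved, stated in full; the proofs are below) =====
def Claim_equal_change_value : Prop := ∀ (turn : Int) (board : List (List (List (Int × String)))) (pos : Int) (symbol : String), Dom_change_value turn board pos symbol → Pre_change_value turn board pos symbol → Spec_change_value turn board pos symbol (change_value turn board pos symbol)

-- ===== LEMMAS AND PROOFS =====

-- the two row-index computations agree
lemma pv_rowidx (pos : Int) :
    (if 1 ≤ pos ∧ pos < 4 then (0 : Nat) else if 4 ≤ pos ∧ pos < 7 then 1 else 2) =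
      (if 1 ≤ pos ∧ pos ≤ 6 then (PySem.Int.floordiv (pos - 1) 3).toNat else 2) := by
  rw [PySem.Int.floordiv_eq_ediv_of_pos (by norm_num)]
  split_ifs <;> omega

-- bridge recursion between A's index loop and B's findIdx?-based update
def pvPlaceRec (row : List (List (Int × String))) (pos : Int) (symbol : String) : List (List (Int × String)) :=
  match row with
  | [] => []
  | cell :: rest =>
      if ((PySem.Dict.ofList cell).keys).headD 0 == pos then
        ((PySem.Dict.ofList cell).insert pos symbol).items :: rest
      else cell :: pvPlaceRec rest pos symbol

lemma pv_write_loop (pos : Int) (symbol : String) (row : List (List (Int × String))) :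
    ∀ i, pvWriteLoop row pos symbol i = row.take i ++ pvPlaceRec (row.drop i) pos symbol := by
  intro i
  induction hn : row.length - i using Nat.strong_induction_on generalizing i with
  | _ n ih =>
    unfold pvWriteLoop
    split
    · next h =>
      rw [List.drop_eq_getElem_cons h]
      unfold pvPlaceRec
      split
      · next hk =>
        exact List.set_eq_take_cons_drop _ h
      · next hk =>
        rw [ih (row.length - (i + 1)) (by omega) (i + 1) rfl]
        have ht : List.take (i + 1) row = List.take i row ++ [row[i]] := by
          rw [List.take_add_one, List.getElem?_eq_getElem h, Option.toList_some]
        rw [ht, List.append_assoc, List.singleton_append]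
    · next h =>
      have hd : row.drop i = [] := List.drop_eq_nil_of_le (by omega)
      rw [hd]
      simp [pvPlaceRec, List.take_of_length_le (Nat.le_of_not_lt h)]

-- pvPlaceRec equals B's findIdx?/set formulation
lemma pv_place_find (pos : Int) (symbol : String) : ∀ (row : List (List (Int × String))),
    pvPlaceRec row pos symbol =
      (match row.findIdx? (fun c => ((PySem.Dict.ofList c).keys).headD 0 == pos) with
       | some i => row.set i (((PySem.Dict.ofList (row.getD i [])).insert pos symbol).items)
       | none => row) := by
  intro row
  induction row with
  | nil => rfl
  | cons cell rest ih =>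
      by_cases hk : ((PySem.Dict.ofList cell).keys.head?.getD 0 = pos)
      · simp [pvPlaceRec, List.findIdx?_cons, hk]
      · simp only [pvPlaceRec, List.findIdx?_cons, ih]
        cases hf : rest.findIdx? (fun c => ((PySem.Dict.ofList c).keys).headD 0 == pos) with
        | none => simp [hk]
        | some i => simp [hk, List.getD]

lemma pv_place_len (pos : Int) (symbol : String) (row : List (List (Int × String))) :
    (pvPlaceRec row pos symbol).length = row.length := by
  induction row with
  | nil => rfl
  | cons cell rest ih => unfold pvPlaceRec; split <;> simp [ih]

-- the nested-append flatten equals the flatMap flatten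
lemma pv_flatten (b : List (List (List (Int × String)))) :
    b.foldl (fun cb i => i.foldl (fun cb j => cb ++ [((PySem.Dict.ofList j).values).headD ""]) cb) [] =
      b.flatMap (fun row => row.map (fun cell => ((PySem.Dict.ofList cell).values).headD "")) := by
  simp only [PySem.List.foldl_append_singleton_eq_map, PySem.List.foldl_append_eq_flatMap,
    List.nil_append]

-- a list with at least nine elements splits into nine heads and a tail
lemma pv_split9 (l : List String) (h : 9 ≤ l.length) :
    ∃ c0 c1 c2 c3 c4 c5 c6 c7 c8 rest, l = c0 :: c1 :: c2 :: c3 :: c4 :: c5 :: c6 :: c7 :: c8 :: rest := by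
  rcases l with _|⟨c0,l⟩; · exact absurd h (by simp)
  rcases l with _|⟨c1,l⟩; · exact absurd h (by simp)
  rcases l with _|⟨c2,l⟩; · exact absurd h (by simp)
  rcases l with _|⟨c3,l⟩; · exact absurd h (by simp)
  rcases l with _|⟨c4,l⟩; · exact absurd h (by simp)
  rcases l with _|⟨c5,l⟩; · exact absurd h (by simp)
  rcases l with _|⟨c6,l⟩; · exact absurd h (by simp)
  rcases l with _|⟨c7,l⟩; · exact absurd h (by simp)
  rcases l with _|⟨c8,l⟩; · exact absurd h (by simp)
  exact ⟨c0,c1,c2,c3,c4,c5,c6,c7,c8,l,rfl⟩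

-- keep the entries of ms whose matching flag is true
def pvSelect : List Bool → List Int → List Int
  | b :: bs, m :: ms => if b then m :: pvSelect bs ms else pvSelect bs ms
  | _, _ => []

lemma pvSelect_nil : ∀ (bs : List Bool), pvSelect bs [] = [] := by
  intro bs; cases bs <;> rfl

-- B's zip/filter/map pipeline computes pvSelect of the equality flags
lemma pv_select_eq (s : String) : ∀ (cs : List String) (ms : List Int),
    ((cs.zip ms).filter (fun p => p.1 == s)).map Prod.snd = pvSelect (cs.map (· == s)) ms := by
  intro cs
  induction cs with
  | nil => intro ms; rfl
  | cons c cs ih =>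
      intro ms
      cases ms with
      | nil => simp [pvSelect_nil]
      | cons m ms =>
          simp only [List.zip_cons_cons, List.filter_cons, List.map_cons, pvSelect]
          by_cases hb : (c == s) = true
          · simp [hb, ih]
          · simp [hb, ih]

-- the eight win lines equal the magic-square sum-15 test (512-case evaluation)
lemma pv_magic (b0 b1 b2 b3 b4 b5 b6 b7 b8 : Bool) (t : List Bool) :
    ((b0 && b1 && b2 || b3 && b4 && b5 || b6 && b7 && b8) ||
     (b0 && b3 && b6 || b1 && b4 && b7 || b2 && b5 && b8) ||
     (b0 && b4 && b8 || b2 && b4 && b6)) =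
      pvTripleB (pvSelect (b0 :: b1 :: b2 :: b3 :: b4 :: b5 :: b6 :: b7 :: b8 :: t) MAGIC) := by
  have h : pvSelect (b0 :: b1 :: b2 :: b3 :: b4 :: b5 :: b6 :: b7 :: b8 :: t) MAGIC =
      pvSelect [b0, b1, b2, b3, b4, b5, b6, b7, b8] MAGIC := by
    simp [MAGIC, pvSelect, pvSelect_nil]
  rw [h]; clear h
  revert b0 b1 b2 b3 b4 b5 b6 b7 b8
  decide

-- updating at an in-range index with the element already there preserves the sum
lemma pv_sum_set (l : List Nat) (n : Nat) (a : Nat) (h : n < l.length) (ha : a = l[n]) :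
    (l.set n a).sum = l.sum := by
  subst ha; simp

-- ===== VERDICT (by name: the statement is the Claim_ definition above) =====
theorem change_value_spec : Claim_equal_change_value := by
  intro turn board pos symbol _hdom hpre
  obtain ⟨hidx, _hne, hsum⟩ := hpre
  unfold Spec_change_value change_value change_value_alt
  simp only [← pv_rowidx pos, ← pv_place_find pos symbol, pv_write_loop pos symbol _ 0,
    List.take_zero, List.drop_zero, List.nil_append]
  set ri := (if 1 ≤ pos ∧ pos < 4 then (0 : Nat) else if 4 ≤ pos ∧ pos < 7 then 1 else 2) with hri
  have hri_lt : ri < board.length := by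
    have : (if 1 ≤ pos ∧ pos ≤ 3 then (0 : Nat) else if 4 ≤ pos ∧ pos ≤ 6 then 1 else 2) = ri := by
      rw [hri]; split_ifs <;> omega
    omega
  set row := board.getD ri [] with hrow
  set board' := board.set ri (pvPlaceRec row pos symbol) with hb'
  unfold check_status
  rw [pv_flatten]
  set f := fun (cell : List (Int × String)) => ((PySem.Dict.ofList cell).values).headD "" with hf
  have hlen : 9 ≤ (board'.flatMap (fun r => r.map f)).length := by
    rw [List.length_flatMap]
    have hmap : board'.map (fun r => (r.map f).length) = (board.map List.length).set ri row.length := by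
      rw [hb', List.map_set]
      simp [pv_place_len]
    rw [hmap, pv_sum_set _ _ _ (by simpa using hri_lt)
      (by rw [hrow, List.getD_eq_getElem board [] hri_lt]; simp)]
    exact hsum
  obtain ⟨c0, c1, c2, c3, c4, c5, c6, c7, c8, rest, hsplit⟩ := pv_split9 _ hlen
  rw [hsplit]
  simp only [List.getD, List.getElem?_cons_zero, List.getElem?_cons_succ, Option.getD_some]
  rw [pv_select_eq]
  simp only [List.map_cons]
  rw [← pv_magic (c0 == symbol) (c1 == symbol) (c2 == symbol) (c3 == symbol) (c4 == symbol)
    (c5 == symbol) (c6 == symbol) (c7 == symbol) (c8 == symbol) (rest.map (· == symbol))]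
  split_ifs with h1 h2 h3 <;> simp_all
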